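-- pv_equiv track=rewrite | github.com/nathanpainchaud/advent-of-code | src/2020/day14/docking_data.py | decoder_v2
-- ===== SOURCE A (Python) =====
-- import itertools
-- from typing import Literal, Mapping, Sequence, Tuple, Union
--
-- Memory = Mapping[int, int]
--
-- def decoder_v2(mask: str, address: str, val: str) -> Memory:
--     val = int(val, 2)
--     floating_address = "".join(
--         address[bit_rank] if mask_bit == "0" else mask[bit_rank]
--         for bit_rank, mask_bit in enumerate(mask)
--     )
--     floating_bits = [
--         bit_rank for bit_rank, bit in enumerate(floating_address) if bit == "X"
--     ]
--     memory = {}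
--     for bit_vals in itertools.product(("0", "1"), repeat=len(floating_bits)):
--         address_bits = list(floating_address)
--         for floating_bit, bit_val in zip(floating_bits, bit_vals):
--             address_bits[floating_bit] = bit_val
--         memory["".join(address_bits)] = val
--     return memory
-- ===== SOURCE B (Python) =====
-- def decoder_v2(mask, address, val):
--     value = int(val, 2)
--     floating = [address[i] if m == "0" else m for i, m in enumerate(mask)]
--     partials = [""]
--     for ch in floating:
--         if ch == "X":
--             partials = [p + b for p in partials for b in "01"]
--         else:
--             partials = [p + ch for p in partials]
--     return {p: value for p in partials}
-- ===== Notes on version B (the rewrite author's own statement) =====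
-- stated objective: alternative
-- what changed: Replaces the itertools.product over floating-bit positions plus per-tuple index assignment by a single left-to-right pass that forks a list of partial address strings at each 'X'; no floating_bits index list is computed.
import Mathlib
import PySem

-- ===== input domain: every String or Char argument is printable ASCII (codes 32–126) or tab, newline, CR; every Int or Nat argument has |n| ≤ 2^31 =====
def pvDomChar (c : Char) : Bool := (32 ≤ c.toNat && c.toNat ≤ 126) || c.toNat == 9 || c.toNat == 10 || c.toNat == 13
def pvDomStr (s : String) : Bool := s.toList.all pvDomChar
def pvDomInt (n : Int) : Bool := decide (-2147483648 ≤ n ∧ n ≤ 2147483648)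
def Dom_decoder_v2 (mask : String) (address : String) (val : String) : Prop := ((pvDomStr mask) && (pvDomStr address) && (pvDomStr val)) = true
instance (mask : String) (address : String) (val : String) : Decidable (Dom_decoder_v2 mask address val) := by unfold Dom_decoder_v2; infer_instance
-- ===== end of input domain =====

-- B replaces itertools.product + per-tuple index assignment by one pass forking partial
-- address strings at each 'X' (objective: alternative decomposition, same cost).

-- ===== PORT A =====
-- itertools.product(("0","1"), repeat=n), tuples in itertools order (last coordinate fastest)
def pyProduct01 : Nat → List (List Char)
  | 0 => [[]]
  | n + 1 => ['0', '1'].flatMap (fun c => (pyProduct01 n).map (fun t => c :: t))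

def decoder_v2 (mask : String) (address : String) (val : String) : List (String × Int) :=
  match PySem.Int.ofStrBase? val 2 with
  | none => []  -- int(val, 2) raises ValueError: excluded by Pre_
  | some v =>
    let m := mask.toList
    let a := address.toList
    let floating : List Char := (PySem.List.enumerate m 0).map
      (fun p => if p.2 = '0' then PySem.List.pyGetD a p.1 ' ' else PySem.List.pyGetD m p.1 ' ')
    let floatingBits : List Int := (PySem.List.enumerate floating 0).filterMap
      (fun p => if p.2 = 'X' then some p.1 else none)
    let memory := (pyProduct01 floatingBits.length).foldl
      (fun d bitVals =>
        let addressBits := (floatingBits.zip bitVals).foldl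
          (fun acc ib => PySem.List.pySetD acc ib.1 ib.2) floating
        d.insert (String.ofList addressBits) v)
      (PySem.Dict.empty : PySem.Dict String Int)
    memory.items

-- ===== PORT B =====
def decoder_v2_alt (mask : String) (address : String) (val : String) : List (String × Int) :=
  match PySem.Int.ofStrBase? val 2 with
  | none => []  -- int(val, 2) raises ValueError: excluded by Pre_
  | some v =>
    let a := address.toList
    let floating : List Char := (PySem.List.enumerate mask.toList 0).map
      (fun p => if p.2 = '0' then PySem.List.pyGetD a p.1 ' ' else p.2)
    let partials := floating.foldl
      (fun ps ch =>
        if ch = 'X' then ps.flatMap (fun p => ['0', '1'].map (fun b => p ++ [b]))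
        else ps.map (fun p => p ++ [ch]))
      ([[]] : List (List Char))
    (partials.foldl (fun d p => d.insert (String.ofList p) v)
      (PySem.Dict.empty : PySem.Dict String Int)).items

-- ===== PRECONDITION & SPEC =====
-- Pre_ excludes exactly the inputs where the Python raises: val not an int(·,2) literal
-- (ValueError), or some mask position holding '0' has no matching address character (IndexError).
def Pre_decoder_v2 (mask : String) (address : String) (val : String) : Prop :=
  (PySem.Int.ofStrBase? val 2).isSome = true ∧
  (mask.toList.zipIdx.all
    (fun p => !(p.1 == '0') || decide (p.2 < address.toList.length))) = true
instance (mask : String) (address : String) (val : String) : Decidable (Pre_decoder_v2 mask address val) := by unfold Pre_decoder_v2; infer_instance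

def pvWitness_decoder_v2 : String × String × String := ("X0", "10", "1")

def Spec_decoder_v2 (mask : String) (address : String) (val : String) (out : List (String × Int)) : Prop := out = decoder_v2_alt mask address val
instance (mask : String) (address : String) (val : String) (out : List (String × Int)) : Decidable (Spec_decoder_v2 mask address val out) := by unfold Spec_decoder_v2; infer_instance

-- ===== CLAIM (what is proved, stated in full; the proofs are below) =====
def Claim_equal_decoder_v2 : Prop := ∀ (mask : String) (address : String) (val : String), Dom_decoder_v2 mask address val → Pre_decoder_v2 mask address val → Spec_decoder_v2 mask address val (decoder_v2 mask address val)

-- ===== LEMMAS AND PROOFS =====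
set_option maxHeartbeats 1000000

-- full expansion of a floating address, in the common order of both programs
def extFA : List Char → List (List Char)
  | [] => [[]]
  | c :: fl =>
    if c = 'X' then ['0', '1'].flatMap (fun b => (extFA fl).map (fun t => b :: t))
    else (extFA fl).map (fun t => c :: t)

-- Nat-valued X positions of fl, counted from s
def natIdx : List Char → Nat → List Nat
  | [], _ => []
  | c :: fl, s => (if c = 'X' then [s] else []) ++ natIdx fl (s + 1)

theorem natIdx_shift (fl : List Char) : ∀ s : Nat, natIdx fl (s + 1) = (natIdx fl s).map (· + 1) := by
  induction fl with
  | nil => intro s; simp [natIdx]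
  | cons c fl ih => intro s; simp [natIdx, ih (s + 1), ih s]; split <;> simp

theorem natIdx_cons_X (fl : List Char) : natIdx ('X' :: fl) 0 = 0 :: (natIdx fl 0).map (· + 1) := by
  simp [natIdx, natIdx_shift fl 0]

theorem natIdx_cons_ne (c : Char) (fl : List Char) (hc : c ≠ 'X') :
    natIdx (c :: fl) 0 = (natIdx fl 0).map (· + 1) := by
  simp [natIdx, hc, natIdx_shift fl 0]

theorem extFA_cons_X (fl : List Char) :
    extFA ('X' :: fl) = ['0', '1'].flatMap (fun b => (extFA fl).map (fun t => b :: t)) := by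
  simp [extFA]

theorem extFA_cons_ne (c : Char) (fl : List Char) (hc : c ≠ 'X') :
    extFA (c :: fl) = (extFA fl).map (fun t => c :: t) := by
  simp [extFA, hc]

theorem filtX_eq_natIdx (fl : List Char) : ∀ s : Nat,
    (PySem.List.enumerate fl (s : Int)).filterMap
      (fun p => if p.2 = 'X' then some p.1 else none)
    = (natIdx fl s).map (fun k : Nat => (k : Int)) := by
  induction fl with
  | nil => intro s; simp [PySem.List.enumerate_nil, natIdx]
  | cons c fl ih =>
    intro s
    have h1 : (s : Int) + 1 = ((s + 1 : Nat) : Int) := by push_cast; ring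
    rw [PySem.List.enumerate_cons, List.filterMap_cons, h1, ih (s + 1)]
    by_cases hc : c = 'X' <;> simp [natIdx, hc]

theorem foldl_pySetD_natCast (ns : List Nat) : ∀ (bs : List Char) (l : List Char),
    ((ns.map (fun k : Nat => (k : Int))).zip bs).foldl
      (fun acc ib => PySem.List.pySetD acc ib.1 ib.2) l
    = (ns.zip bs).foldl (fun acc ib => acc.set ib.1 ib.2) l := by
  induction ns with
  | nil => intro bs l; rfl
  | cons n ns ih =>
    intro bs l
    cases bs with
    | nil => rfl
    | cons b bs =>
      rw [List.map_cons, List.zip_cons_cons, List.zip_cons_cons, List.foldl_cons,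
        List.foldl_cons, PySem.List.pySetD_natCast]
      exact ih bs (l.set n b)

theorem foldl_set_shift (ns : List Nat) : ∀ (bs : List Char) (c : Char) (l : List Char),
    (((ns.map (· + 1)).zip bs).foldl (fun acc ib => acc.set ib.1 ib.2) (c :: l))
    = c :: (ns.zip bs).foldl (fun acc ib => acc.set ib.1 ib.2) l := by
  induction ns with
  | nil => intro bs c l; rfl
  | cons n ns ih =>
    intro bs c l
    cases bs with
    | nil => rfl
    | cons b bs =>
      simp only [List.map_cons, List.zip_cons_cons, List.foldl_cons, List.set_cons_succ]
      exact ih bs c (l.set n b)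

-- A's per-tuple substitution over all product tuples is exactly extFA
theorem keysA_eq_extFA (fl : List Char) :
    (pyProduct01 (natIdx fl 0).length).map
      (fun bits => ((natIdx fl 0).zip bits).foldl (fun acc ib => acc.set ib.1 ib.2) fl)
    = extFA fl := by
  induction fl with
  | nil => simp [natIdx, pyProduct01, extFA]
  | cons c fl ih =>
    by_cases hc : c = 'X'
    · subst hc
      rw [natIdx_cons_X, extFA_cons_X]
      simp only [List.length_cons, List.length_map, pyProduct01]
      rw [List.map_flatMap]
      apply List.flatMap_congr
      intro b _
      rw [List.map_map, ← ih, List.map_map]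
      apply List.map_congr_left
      intro bits _
      simp only [Function.comp_apply, List.zip_cons_cons, List.foldl_cons,
        List.set_cons_zero, foldl_set_shift]
    · rw [natIdx_cons_ne c fl hc, extFA_cons_ne c fl hc]
      simp only [List.length_map]
      rw [← ih, List.map_map]
      apply List.map_congr_left
      intro bits _
      exact foldl_set_shift (natIdx fl 0) bits c fl

-- B's forking fold computes extFA
theorem foldB_eq_extFA (fl : List Char) : ∀ ps : List (List Char),
    fl.foldl (fun ps ch =>
        if ch = 'X' then ps.flatMap (fun p => ['0', '1'].map (fun b => p ++ [b]))
        else ps.map (fun p => p ++ [ch])) ps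
    = ps.flatMap (fun p => (extFA fl).map (fun t => p ++ t)) := by
  induction fl with
  | nil => intro ps; simp [extFA]
  | cons c fl ih =>
    intro ps
    by_cases hc : c = 'X'
    · subst hc
      rw [List.foldl_cons, if_pos rfl, ih, extFA_cons_X]
      simp [List.flatMap_assoc, List.flatMap_map, List.map_flatMap, List.map_map,
        Function.comp_def, List.append_assoc]
    · rw [List.foldl_cons, if_neg hc, ih, extFA_cons_ne c fl hc]
      simp [List.flatMap_map, List.map_map, Function.comp_def, List.append_assoc]

-- the two floating-address computations agree
theorem floating_eq (m a : List Char) :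
    (PySem.List.enumerate m 0).map
      (fun p => if p.2 = '0' then PySem.List.pyGetD a p.1 ' ' else PySem.List.pyGetD m p.1 ' ')
    = (PySem.List.enumerate m 0).map
      (fun p => if p.2 = '0' then PySem.List.pyGetD a p.1 ' ' else p.2) := by
  apply List.map_congr_left
  intro p hp
  rcases (PySem.List.mem_enumerate_iff m 0 p).1 hp with ⟨k, hk, rfl⟩
  by_cases h : m[k] = '0'
  · simp [h]
  · have hg : PySem.List.pyGetD m ((0 : Int) + (k : Int)) ' ' = m[k] := by
      have := PySem.List.pyGetD_ofNat (xs := m) (n := k) (d := ' ') hk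
      simpa using this
    simp [h, hg, List.getElem?_eq_getElem, hk]

-- both dict-building folds agree once the floating address is shared
theorem main_core (fl : List Char) (v : Int) :
    ((pyProduct01 ((PySem.List.enumerate fl 0).filterMap
        (fun p => if p.2 = 'X' then some p.1 else none)).length).foldl
      (fun d bitVals =>
        d.insert (String.ofList
          ((((PySem.List.enumerate fl 0).filterMap
              (fun p => if p.2 = 'X' then some p.1 else none)).zip bitVals).foldl
            (fun acc ib => PySem.List.pySetD acc ib.1 ib.2) fl)) v)
      (PySem.Dict.empty : PySem.Dict String Int))
    = ((fl.foldl (fun ps ch =>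
          if ch = 'X' then ps.flatMap (fun p => ['0', '1'].map (fun b => p ++ [b]))
          else ps.map (fun p => p ++ [ch])) ([[]] : List (List Char))).foldl
        (fun d p => d.insert (String.ofList p) v)
        (PySem.Dict.empty : PySem.Dict String Int)) := by
  have hidx : (PySem.List.enumerate fl 0).filterMap
      (fun p => if p.2 = 'X' then some p.1 else none)
      = (natIdx fl 0).map (fun k : Nat => (k : Int)) := by
    have := filtX_eq_natIdx fl 0
    simpa using this
  rw [hidx, foldB_eq_extFA fl [[]]]
  have hB : (([[]] : List (List Char)).flatMap (fun p => (extFA fl).map (fun t => p ++ t)))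
      = extFA fl := by simp
  rw [hB, ← keysA_eq_extFA fl, List.foldl_map, List.length_map]
  have hfun : (fun (d : PySem.Dict String Int) bitVals =>
        d.insert (String.ofList
          ((((natIdx fl 0).map (fun k : Nat => (k : Int))).zip bitVals).foldl
            (fun acc ib => PySem.List.pySetD acc ib.1 ib.2) fl)) v)
      = (fun (d : PySem.Dict String Int) bitVals =>
        d.insert (String.ofList
          (((natIdx fl 0).zip bitVals).foldl (fun acc ib => acc.set ib.1 ib.2) fl)) v) := by
    funext d bitVals
    rw [foldl_pySetD_natCast]
  rw [hfun]

-- ===== VERDICT (by name: the statement is the Claim_ definition above) =====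
theorem decoder_v2_spec : Claim_equal_decoder_v2 := by
  intro mask address val _ _
  unfold Spec_decoder_v2
  simp only [decoder_v2, decoder_v2_alt]
  cases h : PySem.Int.ofStrBase? val 2 with
  | none => rfl
  | some v =>
    have hfl := floating_eq mask.toList address.toList
    simp only [hfl]
    exact congrArg PySem.Dict.items (main_core _ v)
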